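-- pv_equiv track=rewrite | github.com/delafer/traiNNer-redux | scripts/paragonsr/paragon_deploy_ptq.py | validate_training_checkpoint
-- ===== SOURCE A (Python) =====
-- def validate_training_checkpoint(state_dict: dict) -> tuple[bool, str]:
--     """Validate that the input model is a ParagonSR training checkpoint."""
--     if not state_dict:
--         return False, "Model state dict is empty"
--
--     # Check for ParagonSR-specific patterns
--     has_main_reparam = any(
--         "body" in key and any(x in key for x in ["conv3x3", "conv1x1"])
--         for key in state_dict.keys()
--     )
--
--     has_spatial_reparam = any(
--         "spatial_mixer" in key
--         and any(x in key for x in ["conv3x3", "conv1x1", "dw_conv3x3"])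
--         for key in state_dict.keys()
--     )
--
--     has_layerscale = any(
--         "layerscale" in key.lower() or "gamma" in key for key in state_dict.keys()
--     )
--
--     if not (has_main_reparam or has_spatial_reparam):
--         return False, "Model doesn't contain ParagonSR ReparamConvV2 patterns"
--
--     # Check if already fused
--     fused_conv_keys = [key for key in state_dict.keys() if "fused_conv" in key]
--     if fused_conv_keys:
--         return False, "Model appears to be already fused"
--
--     validation_notes = []
--     if has_layerscale:
--         validation_notes.append("LayerScale detected")
--     if has_main_reparam:
--         validation_notes.append("Main ReparamConvV2 detected")
--     if has_spatial_reparam: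
--         validation_notes.append("Spatial ReparamConvV2 detected")
--
--     return True, f"Valid ParagonSR training checkpoint ({', '.join(validation_notes)})"
-- ===== SOURCE B (Python) =====
-- _NOTE_TABLE = (
--     ("layerscale", "LayerScale detected"),
--     ("main", "Main ReparamConvV2 detected"),
--     ("spatial", "Spatial ReparamConvV2 detected"),
-- )
--
--
-- def _key_tags(key):
--     """Classify one key into the set of ParagonSR tags it evidences."""
--     tags = set()
--     if "body" in key and ("conv3x3" in key or "conv1x1" in key):
--         tags.add("main")
--     if "spatial_mixer" in key and (
--         "conv3x3" in key or "conv1x1" in key or "dw_conv3x3" in key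
--     ):
--         tags.add("spatial")
--     if "layerscale" in key.lower() or "gamma" in key:
--         tags.add("layerscale")
--     if "fused_conv" in key:
--         tags.add("fused")
--     return tags
--
--
-- def validate_training_checkpoint(state_dict: dict) -> tuple[bool, str]:
--     """Validate that the input model is a ParagonSR training checkpoint."""
--     if not state_dict:
--         return False, "Model state dict is empty"
--
--     # Accumulate the set of evidence tags; stop as soon as all four are seen.
--     found = set()
--     for key in state_dict:
--         found |= _key_tags(key)
--         if len(found) == 4:
--             break
--
--     if found.isdisjoint({"main", "spatial"}):
--         return False, "Model doesn't contain ParagonSR ReparamConvV2 patterns"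
--     if "fused" in found:
--         return False, "Model appears to be already fused"
--
--     notes = [note for tag, note in _NOTE_TABLE if tag in found]
--     return True, f"Valid ParagonSR training checkpoint ({', '.join(notes)})"
-- ===== Notes on version B (the rewrite author's own statement) =====
-- stated objective: alternative
-- what changed: Instead of A's four staged any()/filter scans and hand-appended notes list, B classifies each key once into a set of evidence tags ('main'/'spatial'/'layerscale'/'fused'), accumulates the set with an early break once all four tags are seen, decides via set-disjointness/membership, and builds the notes by filtering a declarative tag->note table.
import Mathlib
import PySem

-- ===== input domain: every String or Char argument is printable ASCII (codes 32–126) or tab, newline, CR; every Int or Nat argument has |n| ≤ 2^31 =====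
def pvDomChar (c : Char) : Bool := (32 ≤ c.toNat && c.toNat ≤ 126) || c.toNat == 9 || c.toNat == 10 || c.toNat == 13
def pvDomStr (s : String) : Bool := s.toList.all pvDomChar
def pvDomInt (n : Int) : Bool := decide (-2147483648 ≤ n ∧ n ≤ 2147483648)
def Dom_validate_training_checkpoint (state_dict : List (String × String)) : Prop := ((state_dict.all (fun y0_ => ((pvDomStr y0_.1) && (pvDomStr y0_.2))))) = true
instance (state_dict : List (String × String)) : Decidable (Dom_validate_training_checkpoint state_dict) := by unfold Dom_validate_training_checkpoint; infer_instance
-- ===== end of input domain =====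

-- B replaces A's four staged any()/filter passes and hand-built notes list with a
-- per-key tag classifier accumulated into a set (stopping once all four tags are
-- seen) and a table-driven notes comprehension (objective: alternative, same cost class).

-- ===== PORT A =====  (four separate any()/filter passes, as in the Python)
def validate_training_checkpoint (state_dict : List (String × String)) : Bool × String :=
  if state_dict.isEmpty then (false, "Model state dict is empty")
  else
    let keys := state_dict.map Prod.fst
    let has_main_reparam := keys.any (fun key =>
      PySem.Str.isIn "body" key &&
        (["conv3x3", "conv1x1"].any (fun x => PySem.Str.isIn x key)))
    let has_spatial_reparam := keys.any (fun key =>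
      PySem.Str.isIn "spatial_mixer" key &&
        (["conv3x3", "conv1x1", "dw_conv3x3"].any (fun x => PySem.Str.isIn x key)))
    let has_layerscale := keys.any (fun key =>
      PySem.Str.isIn "layerscale" (PySem.Str.lower key) || PySem.Str.isIn "gamma" key)
    if !(has_main_reparam || has_spatial_reparam) then
      (false, "Model doesn't contain ParagonSR ReparamConvV2 patterns")
    else
      let fused_conv_keys := keys.filter (fun key => PySem.Str.isIn "fused_conv" key)
      if !fused_conv_keys.isEmpty then (false, "Model appears to be already fused")
      else
        let notes : List String := []
        let notes := if has_layerscale then notes ++ ["LayerScale detected"] else notes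
        let notes := if has_main_reparam then notes ++ ["Main ReparamConvV2 detected"] else notes
        let notes := if has_spatial_reparam then notes ++ ["Spatial ReparamConvV2 detected"] else notes
        (true, "Valid ParagonSR training checkpoint (" ++ PySem.Str.join ", " notes ++ ")")

-- ===== PORT B =====  (tag classifier + accumulated tag set with early stop + note table, as in Source B)
def pvNoteTable : List (String × String) :=
  [("layerscale", "LayerScale detected"),
   ("main", "Main ReparamConvV2 detected"),
   ("spatial", "Spatial ReparamConvV2 detected")]

def pvKeyTags (key : String) : PySem.Set String :=
  let tags : PySem.Set String := PySem.Set.empty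
  let tags := if PySem.Str.isIn "body" key &&
      (PySem.Str.isIn "conv3x3" key || PySem.Str.isIn "conv1x1" key) then
    PySem.Set.add tags "main" else tags
  let tags := if PySem.Str.isIn "spatial_mixer" key &&
      (PySem.Str.isIn "conv3x3" key || PySem.Str.isIn "conv1x1" key ||
       PySem.Str.isIn "dw_conv3x3" key) then
    PySem.Set.add tags "spatial" else tags
  let tags := if PySem.Str.isIn "layerscale" (PySem.Str.lower key) ||
      PySem.Str.isIn "gamma" key then
    PySem.Set.add tags "layerscale" else tags
  let tags := if PySem.Str.isIn "fused_conv" key then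
    PySem.Set.add tags "fused" else tags
  tags

-- the 'for key …: found |= _key_tags(key); if len(found) == 4: break' loop of Source B
def pvScan : List String → PySem.Set String → PySem.Set String
  | [], found => found
  | key :: rest, found =>
      let found' := PySem.Set.union found (pvKeyTags key)
      if PySem.Set.len found' = 4 then found' else pvScan rest found'

def validate_training_checkpoint_alt (state_dict : List (String × String)) : Bool × String :=
  if state_dict.isEmpty then (false, "Model state dict is empty")
  else
    let found := pvScan (state_dict.map Prod.fst) PySem.Set.empty
    if PySem.Set.isdisjoint found (PySem.Set.ofList ["main", "spatial"]) then
      (false, "Model doesn't contain ParagonSR ReparamConvV2 patterns")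
    else if PySem.Set.contains found "fused" then
      (false, "Model appears to be already fused")
    else
      let notes := (pvNoteTable.filter (fun p => PySem.Set.contains found p.1)).map Prod.snd
      (true, "Valid ParagonSR training checkpoint (" ++ PySem.Str.join ", " notes ++ ")")

-- ===== PRECONDITION & SPEC =====
def Spec_validate_training_checkpoint (state_dict : List (String × String)) (out : Bool × String) : Prop := out = validate_training_checkpoint_alt state_dict
instance (state_dict : List (String × String)) (out : Bool × String) : Decidable (Spec_validate_training_checkpoint state_dict out) := by unfold Spec_validate_training_checkpoint; infer_instance

-- ===== CLAIM (what is proved, stated in full; the proofs are below) =====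
def Claim_equal_validate_training_checkpoint : Prop := ∀ (state_dict : List (String × String)), Dom_validate_training_checkpoint state_dict → Spec_validate_training_checkpoint state_dict (validate_training_checkpoint state_dict)

-- ===== LEMMAS AND PROOFS =====

def pvPm (key : String) : Bool :=
  PySem.Str.isIn "body" key &&
    (PySem.Str.isIn "conv3x3" key || PySem.Str.isIn "conv1x1" key)
def pvPs (key : String) : Bool :=
  PySem.Str.isIn "spatial_mixer" key &&
    (PySem.Str.isIn "conv3x3" key || PySem.Str.isIn "conv1x1" key ||
     PySem.Str.isIn "dw_conv3x3" key)
def pvPl (key : String) : Bool :=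
  PySem.Str.isIn "layerscale" (PySem.Str.lower key) || PySem.Str.isIn "gamma" key
def pvPf (key : String) : Bool := PySem.Str.isIn "fused_conv" key

def pvAllTags : List String := ["main", "spatial", "layerscale", "fused"]

def pvPred (t : String) (key : String) : Bool :=
  if t = "main" then pvPm key
  else if t = "spatial" then pvPs key
  else if t = "layerscale" then pvPl key
  else pvPf key

theorem pvKeyTags_mem (key t : String) :
    t ∈ pvKeyTags key ↔ t ∈ pvAllTags ∧ pvPred t key = true := by
  unfold pvKeyTags pvPred pvAllTags pvPm pvPs pvPl pvPf PySem.Set.empty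
  split_ifs <;> simp_all

theorem pvScan_mem (keys : List String) (found : PySem.Set String)
    (hnd : found.Nodup) (hsub : ∀ x ∈ found, x ∈ pvAllTags)
    (t : String) (ht : t ∈ pvAllTags) :
    t ∈ pvScan keys found ↔ t ∈ found ∨ keys.any (pvPred t) = true := by
  induction keys generalizing found with
  | nil => simp [pvScan]
  | cons key rest ih =>
    have hnd' : (PySem.Set.union found (pvKeyTags key)).Nodup :=
      PySem.Set.nodup_union _ _ hnd
    have hsub' : ∀ x ∈ PySem.Set.union found (pvKeyTags key), x ∈ pvAllTags := by
      intro x hx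
      rcases (PySem.Set.mem_union _ _ _).1 hx with h | h
      · exact hsub x h
      · exact ((pvKeyTags_mem key x).1 h).1
    have hmem_union : t ∈ PySem.Set.union found (pvKeyTags key) ↔
        t ∈ found ∨ pvPred t key = true := by
      rw [PySem.Set.mem_union, pvKeyTags_mem]
      tauto
    simp only [pvScan, List.any_cons]
    split_ifs with hlen
    · -- early break: the set already holds all four tags
      have hlen' : (PySem.Set.union found (pvKeyTags key)).length = 4 := by
        unfold PySem.Set.len at hlen; exact_mod_cast hlen
      have hsp : List.Subperm (PySem.Set.union found (pvKeyTags key)) pvAllTags :=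
        List.subperm_of_subset hnd' hsub'
      have hperm : List.Perm (PySem.Set.union found (pvKeyTags key)) pvAllTags :=
        hsp.perm_of_length_le (by simp [pvAllTags, hlen'])
      constructor
      · intro _
        rcases hmem_union.1 (hperm.mem_iff.2 ht) with h | h
        · exact Or.inl h
        · exact Or.inr (by simp [h])
      · intro _; exact hperm.mem_iff.2 ht
    · rw [ih _ hnd' hsub', hmem_union]
      simp only [Bool.or_eq_true]
      tauto

theorem pvPred_main : pvPred "main" = pvPm := by funext key; simp [pvPred]
theorem pvPred_spatial : pvPred "spatial" = pvPs := by funext key; simp [pvPred]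
theorem pvPred_layerscale : pvPred "layerscale" = pvPl := by funext key; simp [pvPred]
theorem pvPred_fused : pvPred "fused" = pvPf := by funext key; simp [pvPred]

theorem pvFilter_isEmpty (keys : List String) :
    (keys.filter pvPf).isEmpty = !keys.any pvPf := by
  induction keys with
  | nil => simp
  | cons h t ih =>
    by_cases hp : pvPf h = true <;> simp [hp, ih]

theorem pvFound_mem (keys : List String) (t : String) (ht : t ∈ pvAllTags) :
    t ∈ pvScan keys PySem.Set.empty ↔ keys.any (pvPred t) = true := by
  rw [pvScan_mem keys PySem.Set.empty List.nodup_nil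
      (by intro x hx; cases hx) t ht]
  simp [PySem.Set.empty]

theorem pvFound_contains (keys : List String) (t : String) (ht : t ∈ pvAllTags) :
    PySem.Set.contains (pvScan keys PySem.Set.empty) t = keys.any (pvPred t) := by
  have h1 := PySem.Set.contains_iff (pvScan keys PySem.Set.empty) t
  have h2 := pvFound_mem keys t ht
  cases hx : keys.any (pvPred t) <;> simp_all

theorem pvFound_disjoint (keys : List String) :
    PySem.Set.isdisjoint (pvScan keys PySem.Set.empty)
        (PySem.Set.ofList ["main", "spatial"]) =
      !(keys.any pvPm || keys.any pvPs) := by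
  have hm := pvFound_mem keys "main" (by simp [pvAllTags])
  have hs := pvFound_mem keys "spatial" (by simp [pvAllTags])
  rw [pvPred_main] at hm
  rw [pvPred_spatial] at hs
  have hiff : PySem.Set.isdisjoint (pvScan keys PySem.Set.empty)
      (PySem.Set.ofList ["main", "spatial"]) = true ↔
      (¬ keys.any pvPm = true ∧ ¬ keys.any pvPs = true) := by
    rw [PySem.Set.isdisjoint_iff]
    constructor
    · intro h
      exact ⟨fun hm' => h "main" (hm.2 hm') (by
          rw [PySem.Set.mem_ofList]; simp),
        fun hs' => h "spatial" (hs.2 hs') (by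
          rw [PySem.Set.mem_ofList]; simp)⟩
    · rintro ⟨h1, h2⟩ x hx hxt
      rw [PySem.Set.mem_ofList] at hxt
      simp only [List.mem_cons, List.not_mem_nil, or_false] at hxt
      rcases hxt with rfl | rfl
      · exact h1 (hm.1 hx)
      · exact h2 (hs.1 hx)
  cases h1 : keys.any pvPm <;> cases h2 : keys.any pvPs
  · simp only [Bool.or_self, Bool.not_false]
    exact hiff.2 ⟨by simp [h1], by simp [h2]⟩
  · simp only [Bool.or_true, Bool.not_true]
    exact Bool.eq_false_iff.mpr (fun hd => (hiff.1 hd).2 h2)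
  · simp only [Bool.true_or, Bool.not_true]
    exact Bool.eq_false_iff.mpr (fun hd => (hiff.1 hd).1 h1)
  · simp only [Bool.or_true, Bool.not_true]
    exact Bool.eq_false_iff.mpr (fun hd => (hiff.1 hd).2 h2)

-- ===== VERDICT (by name: the statement is the Claim_ definition above) =====
theorem validate_training_checkpoint_spec : Claim_equal_validate_training_checkpoint := by
  intro state_dict _
  show validate_training_checkpoint state_dict = validate_training_checkpoint_alt state_dict
  unfold validate_training_checkpoint validate_training_checkpoint_alt
  by_cases he : state_dict.isEmpty
  · simp [he]
  · simp only [he]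
    have hm : (state_dict.map Prod.fst).any (fun key =>
        PySem.Str.isIn "body" key &&
          (["conv3x3", "conv1x1"].any (fun x => PySem.Str.isIn x key))) =
        (state_dict.map Prod.fst).any pvPm := by
      refine List.any_congr rfl (fun key => ?_); simp [pvPm]
    have hs : (state_dict.map Prod.fst).any (fun key =>
        PySem.Str.isIn "spatial_mixer" key &&
          (["conv3x3", "conv1x1", "dw_conv3x3"].any (fun x => PySem.Str.isIn x key))) =
        (state_dict.map Prod.fst).any pvPs := by
      refine List.any_congr rfl (fun key => ?_); simp [pvPs, Bool.or_assoc]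
    have hl : (state_dict.map Prod.fst).any (fun key =>
        PySem.Str.isIn "layerscale" (PySem.Str.lower key) || PySem.Str.isIn "gamma" key) =
        (state_dict.map Prod.fst).any pvPl := by
      refine List.any_congr rfl (fun key => ?_); simp [pvPl]
    have hf : ((state_dict.map Prod.fst).filter
        (fun key => PySem.Str.isIn "fused_conv" key)).isEmpty =
        !(state_dict.map Prod.fst).any pvPf := by
      rw [← pvFilter_isEmpty]; rfl
    have hcL := pvFound_contains (state_dict.map Prod.fst) "layerscale" (by simp [pvAllTags])
    have hcM := pvFound_contains (state_dict.map Prod.fst) "main" (by simp [pvAllTags])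
    have hcS := pvFound_contains (state_dict.map Prod.fst) "spatial" (by simp [pvAllTags])
    have hcF := pvFound_contains (state_dict.map Prod.fst) "fused" (by simp [pvAllTags])
    rw [pvPred_layerscale] at hcL
    rw [pvPred_main] at hcM
    rw [pvPred_spatial] at hcS
    rw [pvPred_fused] at hcF
    rw [hm, hs, hl, hf, pvFound_disjoint]
    simp only [pvNoteTable, List.filter_cons, List.filter_nil, hcL, hcM, hcS, hcF]
    cases (state_dict.map Prod.fst).any pvPm <;>
      cases (state_dict.map Prod.fst).any pvPs <;>
      cases (state_dict.map Prod.fst).any pvPl <;>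
      cases (state_dict.map Prod.fst).any pvPf <;> simp
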